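-- pv_equiv track=rewrite | github.com/voussoir/reddit | Lengthflair/lengthflair.py | lengthflair
-- ===== SOURCE A (Python) =====
-- LENGTHS = {100:'Flash Fiction', 200:'Short Fiction', 300:'Extended Fiction'}
--
-- def lengthflair(string):
--     l = len(string)
--     keys = sorted(list(LENGTHS.keys()))
--     for member in keys:
--         if l <= member:
--             f = LENGTHS[member]
--             return f
--     return LENGTHS[keys[-1]]
-- ===== SOURCE B (Python) =====
-- LENGTHS = {100:'Flash Fiction', 200:'Short Fiction', 300:'Extended Fiction'}
--
-- def lengthflair(string):
--     labels = ['Flash Fiction', 'Short Fiction', 'Extended Fiction']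
--     idx = min(max((len(string) - 1) // 100, 0), 2)
--     return labels[idx]
-- ===== Notes on version B (the rewrite author's own statement) =====
-- stated objective: simpler
-- what changed: Replaces the sort-the-dict-keys-and-linearly-scan lookup with a closed-form bucket index min(max((len-1)//100,0),2) into a fixed label list.
import Mathlib
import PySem

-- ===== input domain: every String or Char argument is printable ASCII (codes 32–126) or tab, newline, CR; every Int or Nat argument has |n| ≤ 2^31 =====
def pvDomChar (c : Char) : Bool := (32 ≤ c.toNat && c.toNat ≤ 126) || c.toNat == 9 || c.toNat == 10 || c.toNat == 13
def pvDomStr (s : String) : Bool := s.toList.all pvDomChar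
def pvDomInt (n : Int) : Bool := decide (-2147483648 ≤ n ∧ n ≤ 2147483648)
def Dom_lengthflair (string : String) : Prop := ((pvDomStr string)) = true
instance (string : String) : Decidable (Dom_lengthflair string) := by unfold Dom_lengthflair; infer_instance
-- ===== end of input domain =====

-- B replaces A's sort-the-keys-and-scan with a closed-form bucket index into a fixed label list (simpler).

-- ===== PORT A =====
def LENGTHS : PySem.Dict Int String :=
  PySem.Dict.ofList [(100, "Flash Fiction"), (200, "Short Fiction"), (300, "Extended Fiction")]

-- the 'for member in keys' loop; LENGTHS[member] cannot raise (member ∈ keys), so getD "" is exact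
def lengthflairGo (l : Int) : List Int → Option String
  | [] => none
  | m :: rest => if l ≤ m then some (LENGTHS.getD m "") else lengthflairGo l rest

def lengthflair (string : String) : String :=
  let l := PySem.Str.len string
  let keys := PySem.List.sorted LENGTHS.keys id false
  match lengthflairGo l keys with
  | some f => f
  | none => LENGTHS.getD (PySem.List.pyGetD keys (-1) 0) ""

-- ===== PORT B =====
def lengthflair_alt (string : String) : String :=
  let labels := ["Flash Fiction", "Short Fiction", "Extended Fiction"]
  let idx := min (max (PySem.Int.floordiv (PySem.Str.len string - 1) 100) 0) 2
  PySem.List.pyGetD labels idx ""  -- idx is always in [0,2], so labels[idx] cannot raise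

-- ===== PRECONDITION & SPEC =====
def Spec_lengthflair (string : String) (out : String) : Prop := out = lengthflair_alt string
instance (string : String) (out : String) : Decidable (Spec_lengthflair string out) := by unfold Spec_lengthflair; infer_instance

-- ===== CLAIM (what is proved, stated in full; the proofs are below) =====
def Claim_equal_lengthflair : Prop := ∀ (string : String), Dom_lengthflair string → Spec_lengthflair string (lengthflair string)

-- ===== LEMMAS AND PROOFS =====

-- both programs depend only on the length n of the string
lemma lengthflair_eq_of_len (n : Nat) (string : String) (h : string.toList.length = n) :
    lengthflair string = lengthflair_alt string := by
  have hl : PySem.Str.len string = (n : Int) := by simp [PySem.Str.len_eq, h]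
  have hkeys : PySem.List.sorted LENGTHS.keys id false = [100, 200, 300] := by decide
  unfold lengthflair lengthflair_alt
  rw [hl, hkeys]
  by_cases h0 : n = 0
  · subst h0; decide
  · have h1 : 1 ≤ n := Nat.one_le_iff_ne_zero.mpr h0
    have hfd : PySem.Int.floordiv ((n : Int) - 1) 100 = (((n - 1) / 100 : Nat) : Int) := by
      have he : ((n : Int) - 1) = ((n - 1 : Nat) : Int) := by omega
      rw [he]; exact_mod_cast PySem.Int.floordiv_natCast (n - 1) 100
    rw [hfd]
    by_cases ha : n ≤ 100
    · have : (n - 1) / 100 = 0 := by omega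
      simp [lengthflairGo, this, show (n : Int) ≤ 100 by omega]
      decide
    · by_cases hb : n ≤ 200
      · have : (n - 1) / 100 = 1 := by omega
        simp [lengthflairGo, this, show ¬ (n : Int) ≤ 100 by omega,
              show (n : Int) ≤ 200 by omega]
        decide
      · by_cases hc : n ≤ 300
        · have : (n - 1) / 100 = 2 := by omega
          simp [lengthflairGo, this, show ¬ (n : Int) ≤ 100 by omega,
                show ¬ (n : Int) ≤ 200 by omega, show (n : Int) ≤ 300 by omega]
          decide
        · rw [show min (max (((n - 1) / 100 : Nat) : Int) 0) 2 = 2 by omega]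
          simp [lengthflairGo, show ¬ (n : Int) ≤ 100 by omega,
                show ¬ (n : Int) ≤ 200 by omega, show ¬ (n : Int) ≤ 300 by omega]
          decide

-- ===== VERDICT (by name: the statement is the Claim_ definition above) =====
theorem lengthflair_spec : Claim_equal_lengthflair := by
  intro string _
  unfold Spec_lengthflair
  exact lengthflair_eq_of_len string.toList.length string rfl
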